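-- pv_equiv track=rewrite | github.com/Ale962/ITS---Python | Python/Lesson_7/Functions_Holydays_Exercises/#_Lesson_7_Exercise_on_Functions_3.py | rimuovi_elementi
-- ===== SOURCE A (Python) =====
-- def rimuovi_elementi(lista: list[int], da_rimuovere: dict[int:int]) -> list[int]:
--
--     clean_list: list = []
--
--     for key, value in da_rimuovere.items():
--
--         i = 1
--
--         for x in lista:
--
--             if x == key:
--                 if i <= value:
--                     i+=1
--                     continue
--                 else:
--                     clean_list.append(x)
--
--             else:
--                 clean_list.append(x)
--
--     return clean_list
-- ===== SOURCE B (Python) =====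
-- def rimuovi_elementi(lista: list[int], da_rimuovere: dict[int:int]) -> list[int]:
--     clean_list: list = []
--     for key, value in da_rimuovere.items():
--         temp = list(lista)
--         for _ in range(value):
--             try:
--                 temp.remove(key)
--             except ValueError:
--                 break
--         clean_list.extend(temp)
--     return clean_list
-- ===== Notes on version B (the rewrite author's own statement) =====
-- stated objective: alternative
-- what changed: Replaces A's per-key counting scan with explicit continue/append branching by taking a copy of lista per key and calling temp.remove(key) up to value times (breaking on ValueError), then extending the accumulator with the remaining copy.
import Mathlib
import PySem

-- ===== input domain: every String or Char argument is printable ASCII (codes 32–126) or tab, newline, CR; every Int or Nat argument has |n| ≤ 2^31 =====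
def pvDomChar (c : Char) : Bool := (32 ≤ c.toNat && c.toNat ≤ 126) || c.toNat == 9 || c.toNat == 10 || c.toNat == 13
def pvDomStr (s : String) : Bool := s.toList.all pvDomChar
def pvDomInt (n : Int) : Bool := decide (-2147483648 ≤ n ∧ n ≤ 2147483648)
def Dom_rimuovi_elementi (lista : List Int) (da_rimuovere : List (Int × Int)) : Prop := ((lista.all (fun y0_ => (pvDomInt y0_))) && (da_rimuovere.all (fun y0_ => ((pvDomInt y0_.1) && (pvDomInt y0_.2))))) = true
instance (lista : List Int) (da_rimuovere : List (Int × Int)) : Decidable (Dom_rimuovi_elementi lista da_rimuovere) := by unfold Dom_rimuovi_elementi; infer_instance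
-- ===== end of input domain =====

-- B replaces A's per-key counting scan by a per-key copy with repeated `remove` calls; objective: alternative (same result, different control flow).

-- ===== PORT A =====
-- inner `for x in lista` loop of A: state is (i, clean_list)
def rimuoviInnerA (key value : Int) (st : Int × List Int) (x : Int) : Int × List Int :=
  if x == key then
    if st.1 ≤ value then (st.1 + 1, st.2)
    else (st.1, st.2 ++ [x])
  else (st.1, st.2 ++ [x])

def rimuovi_elementi (lista : List Int) (da_rimuovere : List (Int × Int)) : List Int :=
  (da_rimuovere.foldl (fun clean_list kv =>
    (lista.foldl (rimuoviInnerA kv.1 kv.2) (1, clean_list)).2) [])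

-- ===== PORT B =====
-- the `for _ in range(value): try temp.remove(key) except ValueError: break` loop
def removeLoopB (key : Int) (temp : List Int) : Nat → List Int
  | 0 => temp
  | n + 1 =>
    match PySem.List.remove? temp key with
    | some t => removeLoopB key t n
    | none => temp

def rimuovi_elementi_alt (lista : List Int) (da_rimuovere : List (Int × Int)) : List Int :=
  da_rimuovere.foldl (fun clean_list kv =>
    clean_list ++ removeLoopB kv.1 lista kv.2.toNat) []

-- ===== PRECONDITION & SPEC =====
def Spec_rimuovi_elementi (lista : List Int) (da_rimuovere : List (Int × Int)) (out : List Int) : Prop := out = rimuovi_elementi_alt lista da_rimuovere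
instance (lista : List Int) (da_rimuovere : List (Int × Int)) (out : List Int) : Decidable (Spec_rimuovi_elementi lista da_rimuovere out) := by unfold Spec_rimuovi_elementi; infer_instance

-- ===== CLAIM (what is proved, stated in full; the proofs are below) =====
def Claim_equal_rimuovi_elementi : Prop := ∀ (lista : List Int) (da_rimuovere : List (Int × Int)), Dom_rimuovi_elementi lista da_rimuovere → Spec_rimuovi_elementi lista da_rimuovere (rimuovi_elementi lista da_rimuovere)

-- ===== LEMMAS AND PROOFS =====

-- canonical form: remove the first n occurrences of k
def dropOcc (k : Int) : List Int → Nat → List Int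
  | [], _ => []
  | x :: xs, 0 => x :: xs
  | x :: xs, n + 1 => if x = k then dropOcc k xs n else x :: dropOcc k xs (n + 1)

theorem dropOcc_zero (k : Int) (xs : List Int) : dropOcc k xs 0 = xs := by
  cases xs <;> simp [dropOcc]

theorem removeLoopB_cons_ne (k x : Int) (hx : x ≠ k) (xs : List Int) (n : Nat) :
    removeLoopB k (x :: xs) n = x :: removeLoopB k xs n := by
  induction n generalizing xs with
  | zero => simp [removeLoopB]
  | succ n ih =>
    have hrem : PySem.List.remove? (x :: xs) k = (PySem.List.remove? xs k).map (x :: ·) :=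
      PySem.List.remove?_cons_of_ne _ hx
    cases h : PySem.List.remove? xs k with
    | none => simp [removeLoopB, hrem, h]
    | some t => simp [removeLoopB, hrem, h, ih]

theorem removeLoopB_eq_dropOcc (k : Int) (xs : List Int) (n : Nat) :
    removeLoopB k xs n = dropOcc k xs n := by
  induction xs generalizing n with
  | nil => cases n <;> simp [removeLoopB, dropOcc, PySem.List.remove?]
  | cons x xs ih =>
    cases n with
    | zero => simp [removeLoopB, dropOcc]
    | succ n =>
      by_cases hx : x = k
      · subst hx
        simp [removeLoopB, PySem.List.remove?_cons_self, dropOcc, ih]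
      · rw [removeLoopB_cons_ne k x hx, ih]
        simp [dropOcc, hx]

-- A's inner loop, started at counter i with accumulator acc, appends exactly
-- lista with the first (value - i + 1) occurrences of key removed.
theorem foldl_innerA (key value : Int) (xs : List Int) :
    ∀ (i : Int) (acc : List Int),
      (xs.foldl (rimuoviInnerA key value) (i, acc)).2
        = acc ++ dropOcc key xs (value - i + 1).toNat := by
  induction xs with
  | nil => intro i acc; simp [dropOcc]
  | cons x xs ih =>
    intro i acc
    by_cases hx : x = key
    · subst hx
      by_cases hi : i ≤ value
      · have hn : (value - i + 1).toNat = (value - (i + 1) + 1).toNat + 1 := by omega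
        simp only [List.foldl_cons, rimuoviInnerA, BEq.rfl, if_true, if_pos hi]
        rw [ih (i + 1) acc, hn]
        simp [dropOcc]
      · have hn : (value - i + 1).toNat = 0 := by omega
        simp only [List.foldl_cons, rimuoviInnerA, BEq.rfl, if_true, if_neg hi]
        rw [ih i (acc ++ [x]), hn]
        simp [dropOcc, dropOcc_zero]
    · simp only [List.foldl_cons, rimuoviInnerA, beq_iff_eq, if_neg hx]
      rw [ih i (acc ++ [x])]
      cases hn : (value - i + 1).toNat with
      | zero => simp [dropOcc, dropOcc_zero]
      | succ m => simp [dropOcc, hx]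

theorem rimuovi_outer (lista : List Int) (dr : List (Int × Int)) :
    ∀ acc : List Int,
      dr.foldl (fun clean_list kv =>
          (lista.foldl (rimuoviInnerA kv.1 kv.2) (1, clean_list)).2) acc
        = dr.foldl (fun clean_list kv =>
            clean_list ++ removeLoopB kv.1 lista kv.2.toNat) acc := by
  induction dr with
  | nil => intro acc; rfl
  | cons kv dr ih =>
    intro acc
    simp only [List.foldl_cons]
    rw [foldl_innerA, removeLoopB_eq_dropOcc, ih]
    have : (kv.2 - 1 + 1).toNat = kv.2.toNat := by omega
    rw [this]

-- ===== VERDICT (by name: the statement is the Claim_ definition above) =====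
theorem rimuovi_elementi_spec : Claim_equal_rimuovi_elementi := by
  intro lista dr _
  unfold Spec_rimuovi_elementi rimuovi_elementi rimuovi_elementi_alt
  exact rimuovi_outer lista dr []
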